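-- pv_equiv track=rewrite | github.com/notsoseamless/python_training | algorithmic_thinking/Coding_activities/alg_further_leaplist_solution.py | is_goal_reachable_max
-- ===== SOURCE A (Python) =====
-- def is_goal_reachable_max(leap_list, start_index, max_leaps):
--     """
--     Determines whether goal can be reached in at most max_leaps leaps.
--
--     Arguments:
--     leap_list - the leap list game board.
--     start_index - the starting index of the player.
--     max_leaps - the most number of leaps allowed before the player loses.
--
--     Returns:
--     True if goal is reachable in max_leap or less leaps.  False if goal is not reachable in max_leap or fewer leaps.
--     """
--
--     if start_index < 0:  # leapt off the list left
--         return False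
--     elif start_index >= len(leap_list):  # leapt off the list right
--         return False
--     elif leap_list[start_index] == 0:
--         return True
--     elif max_leaps == 0:
--         return False
--     else:
--         leap_left_index  = start_index - leap_list[start_index]
--         leap_right_index = start_index + leap_list[start_index]
--         return (is_goal_reachable_max(leap_list, leap_left_index,  max_leaps-1)
--                 or is_goal_reachable_max(leap_list, leap_right_index, max_leaps-1))
-- ===== SOURCE B (Python) =====
-- def is_goal_reachable_max(leap_list, start_index, max_leaps):
--     """Breadth-first level-set search: expand the set of positions reachable
--     in exactly k leaps for k = 0..max_leaps, answering True as soon as a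
--     level contains a zero cell."""
--     n = len(leap_list)
--     frontier = {start_index} if 0 <= start_index < n else set()
--     remaining = max_leaps + 1  # levels still allowed to be inspected
--     while remaining > 0 and frontier:
--         if any(leap_list[i] == 0 for i in frontier):
--             return True
--         frontier = {j for i in frontier
--                       for j in (i - leap_list[i], i + leap_list[i])
--                       if 0 <= j < n}
--         remaining -= 1
--     return False
-- ===== Notes on version B (the rewrite author's own statement) =====
-- stated objective: alternative
-- what changed: Replaces A's two-branch recursion over individual leap paths by an iterative breadth-first expansion of the SET of positions reachable in exactly k leaps (k = 0..max_leaps), answering True when a level contains a zero cell.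
-- outside the precondition, e.g. on is_goal_reachable_max([0], 0, -1): A returns True, B returns False; on is_goal_reachable_max([1, 1], 0, -1): A raises RecursionError, B returns False
import Mathlib
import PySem

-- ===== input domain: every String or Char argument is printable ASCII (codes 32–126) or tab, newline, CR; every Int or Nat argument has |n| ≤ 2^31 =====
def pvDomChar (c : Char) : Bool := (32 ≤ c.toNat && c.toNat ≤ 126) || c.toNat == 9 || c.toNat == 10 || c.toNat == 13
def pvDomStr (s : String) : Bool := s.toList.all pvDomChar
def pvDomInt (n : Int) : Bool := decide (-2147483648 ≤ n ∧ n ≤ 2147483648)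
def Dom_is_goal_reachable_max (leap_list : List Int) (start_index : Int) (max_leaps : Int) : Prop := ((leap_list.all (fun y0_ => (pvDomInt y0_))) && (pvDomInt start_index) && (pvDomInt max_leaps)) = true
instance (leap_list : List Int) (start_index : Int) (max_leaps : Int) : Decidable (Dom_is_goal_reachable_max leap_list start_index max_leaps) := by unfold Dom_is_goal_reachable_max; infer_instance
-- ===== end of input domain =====

-- B replaces A's binary recursion over individual leap paths by an iterative
-- breadth-first expansion of per-level position sets (objective: alternative).

-- ===== PORT A =====
-- literal transliteration of A's recursion; `fuel` (= max_leaps.toNat) only makes the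
-- Lean recursion structurally terminating, it is never the deciding branch when max_leaps ≥ 0.
def pvA_go (ll : List Int) : Nat → Int → Int → Bool
  | fuel, s, m =>
    if s < 0 then false
    else if (ll.length : Int) ≤ s then false
    else
      let v := (PySem.List.pyGet? ll s).getD 0
      if v = 0 then true
      else if m = 0 then false
      else
        match fuel with
        | 0 => false
        | f + 1 => pvA_go ll f (s - v) (m - 1) || pvA_go ll f (s + v) (m - 1)

def is_goal_reachable_max (leap_list : List Int) (start_index : Int) (max_leaps : Int) : Bool :=
  pvA_go leap_list max_leaps.toNat start_index max_leaps

-- ===== PORT B =====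
def pvInR (ll : List Int) (i : Int) : Bool := decide (0 ≤ i) && decide (i < (ll.length : Int))

def pvVal (ll : List Int) (i : Int) : Int := (PySem.List.pyGet? ll i).getD 0

-- the set comprehension {j for i in frontier for j in (i-v, i+v) if 0 <= j < n}
def pvExpand (ll : List Int) (F : List Int) : List Int :=
  F.flatMap (fun i => [i - pvVal ll i, i + pvVal ll i].filter (fun j => pvInR ll j))

-- the while loop; the Nat argument is Python's `remaining` counter
def pvB_go (ll : List Int) : Nat → List Int → Bool
  | 0, _ => false
  | r + 1, F =>
    if F.isEmpty then false
    else if F.any (fun i => pvVal ll i == 0) then true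
    else pvB_go ll r (PySem.Set.ofList (pvExpand ll F))

def is_goal_reachable_max_alt (leap_list : List Int) (start_index : Int) (max_leaps : Int) : Bool :=
  pvB_go leap_list (max_leaps + 1).toNat (if pvInR leap_list start_index then [start_index] else [])

-- ===== PRECONDITION & SPEC =====
-- Pre_ restricts to the task's natural domain max_leaps ≥ 0: for a negative leap budget A
-- ignores it entirely (it can recurse without bound — RecursionError — on cyclic boards,
-- and where it does return its value is an artefact of never testing the exhausted budget).
def Pre_is_goal_reachable_max (leap_list : List Int) (start_index : Int) (max_leaps : Int) : Prop :=
  0 ≤ max_leaps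
instance (leap_list : List Int) (start_index : Int) (max_leaps : Int) : Decidable (Pre_is_goal_reachable_max leap_list start_index max_leaps) := by unfold Pre_is_goal_reachable_max; infer_instance

def pvWitness_is_goal_reachable_max : List Int × Int × Int := ([2, 1, 0], 0, 3)

def Spec_is_goal_reachable_max (leap_list : List Int) (start_index : Int) (max_leaps : Int) (out : Bool) : Prop := out = is_goal_reachable_max_alt leap_list start_index max_leaps
instance (leap_list : List Int) (start_index : Int) (max_leaps : Int) (out : Bool) : Decidable (Spec_is_goal_reachable_max leap_list start_index max_leaps out) := by unfold Spec_is_goal_reachable_max; infer_instance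

-- ===== CLAIM (what is proved, stated in full; the proofs are below) =====
def Claim_equal_is_goal_reachable_max : Prop := ∀ (leap_list : List Int) (start_index : Int) (max_leaps : Int), Dom_is_goal_reachable_max leap_list start_index max_leaps → Pre_is_goal_reachable_max leap_list start_index max_leaps → Spec_is_goal_reachable_max leap_list start_index max_leaps (is_goal_reachable_max leap_list start_index max_leaps)

-- ===== LEMMAS AND PROOFS =====

-- a position off the board gives false for any fuel/budget
lemma pvA_go_out (ll : List Int) (fuel : Nat) (j m : Int) (h : pvInR ll j = false) :
    pvA_go ll fuel j m = false := by
  rw [pvA_go]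
  simp only [pvInR, Bool.and_eq_false_iff, decide_eq_false_iff_not, not_le, not_lt] at h
  rcases h with h | h
  · simp [h]
  · simp [not_lt.mpr h]

-- one-step characterisation of A's recursion at positive budget k+1 with matching fuel
lemma pvA_go_step (ll : List Int) (k : Nat) (i : Int) (hin : pvInR ll i = true)
    (hnz : ¬ pvVal ll i = 0) :
    pvA_go ll (k + 1) i ((k : Int) + 1)
      = (pvA_go ll k (i - pvVal ll i) (k : Int) || pvA_go ll k (i + pvVal ll i) (k : Int)) := by
  simp only [pvInR, Bool.and_eq_true, decide_eq_true_eq] at hin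
  rw [pvA_go]
  have h1 : ¬ i < 0 := not_lt.mpr hin.1
  have h2 : ¬ (ll.length : Int) ≤ i := not_le.mpr hin.2
  have h3 : ¬ ((k : Int) + 1 = 0) := by positivity
  simp only [h1, if_false, h2, if_false, pvVal] at *
  simp [hnz, h3, show (k : Int) + 1 - 1 = (k : Int) by ring]

-- at budget 0 A answers exactly "in range and zero"
lemma pvA_go_zero (ll : List Int) (i : Int) :
    pvA_go ll 0 i 0 = (pvInR ll i && (pvVal ll i == 0)) := by
  rw [pvA_go]
  by_cases h1 : i < 0
  · simp [h1, pvInR, not_le.mpr h1]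
  · by_cases h2 : (ll.length : Int) ≤ i
    · simp [h2, pvInR, not_lt.mpr h2]
    · by_cases hz : (PySem.List.pyGet? ll i).getD 0 = 0
      · apply Bool.eq_iff_iff.mpr
        simp [h1, h2, pvInR, pvVal, not_lt.mp h1, not_le.mp h2]
      · simp [h1, h2, hz, pvVal]

-- every element pvExpand produces is on the board
lemma pvExpand_inR (ll : List Int) (F : List Int) :
    ∀ j ∈ pvExpand ll F, pvInR ll j = true := by
  intro j hj
  simp only [pvExpand, List.mem_flatMap, List.mem_filter] at hj
  rcases hj with ⟨i, _, _, h⟩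
  exact h

-- main invariant: the level loop run with k+1 remaining levels on an in-range frontier F
-- answers exactly "some position of F reaches a zero cell in at most k leaps" (A's recursion)
lemma pvB_eq_anyA (ll : List Int) :
    ∀ (k : Nat) (F : List Int), (∀ i ∈ F, pvInR ll i = true) →
      pvB_go ll (k + 1) F = F.any (fun i => pvA_go ll k i (k : Int)) := by
  intro k
  induction k with
  | zero =>
    intro F hF
    simp only [Nat.cast_zero]
    rw [pvB_go]
    by_cases hE : F.isEmpty
    · simp [List.isEmpty_iff.mp hE]
    · rw [if_neg hE]
      by_cases hz : F.any (fun i => pvVal ll i == 0)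
      · rw [if_pos hz]
        rcases List.any_eq_true.mp hz with ⟨i, hi, hzi⟩
        refine (List.any_eq_true.mpr ⟨i, hi, ?_⟩).symm
        rw [pvA_go_zero]; simp only [hF i hi, Bool.true_and]; exact hzi
      · rw [if_neg hz]; rw [pvB_go]
        symm
        apply List.any_eq_false.mpr
        intro i hi
        rw [pvA_go_zero, hF i hi, Bool.true_and]
        have := List.any_eq_false.mp (Bool.eq_false_iff.mpr hz) i hi
        simpa using this
  | succ k ih =>
    intro F hF
    rw [pvB_go]
    by_cases hE : F.isEmpty
    · simp [List.isEmpty_iff.mp hE]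
    · rw [if_neg hE]
      by_cases hz : F.any (fun i => pvVal ll i == 0)
      · rw [if_pos hz]
        rcases List.any_eq_true.mp hz with ⟨i, hi, hzi⟩
        refine (List.any_eq_true.mpr ⟨i, hi, ?_⟩).symm
        rw [pvA_go]
        have hin := hF i hi
        simp only [pvInR, Bool.and_eq_true, decide_eq_true_eq] at hin
        have hzi2 : (PySem.List.pyGet? ll i).getD 0 = 0 := by simpa [pvVal] using hzi
        simp [not_lt.mpr hin.1, not_le.mpr hin.2, hzi2]
      · rw [if_neg hz]
        have hnoz : ∀ i ∈ F, ¬ pvVal ll i = 0 := by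
          intro i hi h
          have := List.any_eq_false.mp (Bool.eq_false_iff.mpr hz) i hi
          simp [h] at this
        rw [ih _ (fun j hj => pvExpand_inR ll F j ((PySem.Set.mem_ofList _ _).mp hj))]
        apply Bool.eq_iff_iff.mpr
        simp only [List.any_eq_true]
        have hstep : ∀ i ∈ F, pvA_go ll (k + 1) i ((k : Int) + 1)
            = (pvA_go ll k (i - pvVal ll i) (k : Int) || pvA_go ll k (i + pvVal ll i) (k : Int)) :=
          fun i hi => pvA_go_step ll k i (hF i hi) (hnoz i hi)
        constructor
        · rintro ⟨j, hj, hAj⟩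
          have hj' := (PySem.Set.mem_ofList _ _).mp hj
          simp only [pvExpand, List.mem_flatMap, List.mem_filter] at hj'
          rcases hj' with ⟨i, hiF, hjmem, _⟩
          refine ⟨i, hiF, ?_⟩
          have hjor : j = i - pvVal ll i ∨ j = i + pvVal ll i := by simpa using hjmem
          have : pvA_go ll (k + 1) i ((k : Int) + 1) = true := by
            rw [hstep i hiF]
            rcases hjor with h | h
            · subst h; simp [hAj]
            · subst h; simp [hAj]
          simpa using this
        · rintro ⟨i, hiF, hAi⟩
          have hAi' : pvA_go ll (k + 1) i ((k : Int) + 1) = true := by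
            simpa using hAi
          rw [hstep i hiF] at hAi'
          have key : ∀ j, j = i - pvVal ll i ∨ j = i + pvVal ll i →
              pvA_go ll k j (k : Int) = true → ∃ j', j' ∈ PySem.Set.ofList (pvExpand ll F) ∧
                pvA_go ll k j' (k : Int) = true := by
            intro j hjm hA
            have hinj : pvInR ll j = true := by
              by_contra hc
              rw [pvA_go_out ll k j (k : Int) (Bool.not_eq_true _ ▸ Bool.eq_false_iff.mpr hc)] at hA
              exact Bool.false_ne_true hA
            refine ⟨j, (PySem.Set.mem_ofList _ _).mpr ?_, hA⟩
            simp only [pvExpand, List.mem_flatMap, List.mem_filter]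
            refine ⟨i, hiF, ?_, hinj⟩
            rcases hjm with h | h <;> simp [h]
          rcases Bool.or_eq_true_iff.mp hAi' with h | h
          · exact key _ (Or.inl rfl) h
          · exact key _ (Or.inr rfl) h

-- ===== VERDICT (by name: the statement is the Claim_ definition above) =====
theorem is_goal_reachable_max_spec : Claim_equal_is_goal_reachable_max := by
  intro ll s m _ hpre
  unfold Spec_is_goal_reachable_max is_goal_reachable_max is_goal_reachable_max_alt
  have hm : ((m.toNat : Int)) = m := Int.toNat_of_nonneg hpre
  have hm1 : (m + 1).toNat = m.toNat + 1 := by omega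
  rw [hm1]
  by_cases hin : pvInR ll s
  · rw [if_pos hin, pvB_eq_anyA ll m.toNat [s] (by intro i hi; simp at hi; subst hi; exact hin)]
    simp [hm]
  · rw [if_neg hin, pvA_go_out ll m.toNat s m (Bool.not_eq_true _ ▸ Bool.eq_false_iff.mpr hin)]
    rw [pvB_eq_anyA ll m.toNat [] (by intro i hi; cases hi)]
    simp
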